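-- pv_equiv track=rewrite | github.com/PatoLocos/Erdos530 | experiments/verify_axiom_counting.py | check_witness_2to1
-- ===== SOURCE A (Python) =====
-- from collections import defaultdict
--
-- def check_witness_2to1(blocked, capacity=2):
--     """Check if a 2-to-1 WITNESS map exists (backtracking)."""
--     if not blocked:
--         return True, {}
--     elements = sorted(blocked.keys(), key=lambda x: len(blocked[x]))
--     pairs_usage = defaultdict(int)
--     assignment = {}
--     def backtrack(idx):
--         if idx == len(elements):
--             return True
--         x = elements[idx]
--         for pair in sorted(blocked[x]):
--             if pairs_usage[pair] < capacity:
--                 pairs_usage[pair] += 1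
--                 assignment[x] = pair
--                 if backtrack(idx + 1):
--                     return True
--                 pairs_usage[pair] -= 1
--                 del assignment[x]
--         return False
--     if backtrack(0):
--         return True, dict(assignment)
--     return False, None
-- ===== SOURCE B (Python) =====
-- def check_witness_2to1(blocked, capacity=2):
--     """Check if a 2-to-1 WITNESS map exists (iterative DFS over persistent states)."""
--     if not blocked:
--         return True, {}
--     elements = sorted(blocked, key=lambda x: len(blocked[x]))
--     first = elements[0]
--     # Each stack entry is a full choice point: (element, untried candidate pairs,
--     # remaining elements, usage counts, partial assignment).  No undo is needed:
--     # alternatives keep their own copies of the state.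
--     stack = [(first, sorted(blocked[first]), elements[1:], {}, {})]
--     while stack:
--         x, cands, todo, usage, assignment = stack.pop()
--         if not cands:
--             continue
--         p = cands[0]
--         stack.append((x, cands[1:], todo, usage, assignment))
--         if usage.get(p, 0) < capacity:
--             if not todo:
--                 return True, {**assignment, x: p}
--             y = todo[0]
--             stack.append((y, sorted(blocked[y]), todo[1:],
--                           {**usage, p: usage.get(p, 0) + 1},
--                           {**assignment, x: p}))
--     return False, None
-- ===== Notes on version B (the rewrite author's own statement) =====
-- stated objective: alternative
-- what changed: A's recursive backtrack mutating shared pairs_usage/assignment dicts with explicit undo is replaced by an iterative DFS loop over an explicit stack of self-contained choice points (element, untried candidates, remaining elements, usage, assignment), so no recursion and no undo; it visits candidates in the same order and returns the same first-found assignment.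
import Mathlib
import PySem

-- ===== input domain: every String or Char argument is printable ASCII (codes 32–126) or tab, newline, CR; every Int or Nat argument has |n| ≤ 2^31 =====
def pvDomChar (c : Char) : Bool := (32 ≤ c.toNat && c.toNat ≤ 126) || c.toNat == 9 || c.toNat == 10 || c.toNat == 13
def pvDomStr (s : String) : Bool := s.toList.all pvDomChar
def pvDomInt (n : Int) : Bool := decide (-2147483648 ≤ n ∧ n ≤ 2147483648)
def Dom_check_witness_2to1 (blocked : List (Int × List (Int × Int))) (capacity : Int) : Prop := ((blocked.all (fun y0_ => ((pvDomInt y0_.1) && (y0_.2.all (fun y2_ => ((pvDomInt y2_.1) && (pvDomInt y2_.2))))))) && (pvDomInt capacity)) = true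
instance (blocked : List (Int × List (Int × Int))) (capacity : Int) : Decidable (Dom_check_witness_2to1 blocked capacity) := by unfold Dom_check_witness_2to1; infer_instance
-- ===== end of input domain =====

-- B replaces A's recursive backtracking with shared mutable dicts and undo by an
-- iterative DFS over an explicit stack of self-contained choice points (persistent
-- copies, no undo); same first-found assignment, objective: alternative.

-- ===== PORT A =====

-- sorted(l) on a list of int pairs: Python's lexicographic tuple order
def pvSortedPairs (l : List (Int × Int)) : List (Int × Int) :=
  PySem.List.sorted2 l (fun t => t.1) (fun t => t.2)

-- A's `backtrack(idx)` / its `for pair in sorted(blocked[x])` loop, with the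
-- shared dicts `pairs_usage` / `assignment` threaded through and returned.
mutual
def pvBtA (capacity : Int) (bd : PySem.Dict Int (List (Int × Int))) :
    List Int → PySem.Dict (Int × Int) Int → PySem.Dict Int (Int × Int) →
    Bool × PySem.Dict (Int × Int) Int × PySem.Dict Int (Int × Int)
  | [], u, a => (true, u, a)
  | x :: ys, u, a => pvTryA capacity bd x ys (pvSortedPairs (bd.getD x [])) u a
  termination_by l _ _ => (l.length, 1, 0)

def pvTryA (capacity : Int) (bd : PySem.Dict Int (List (Int × Int))) (x : Int) (ys : List Int) :
    List (Int × Int) → PySem.Dict (Int × Int) Int → PySem.Dict Int (Int × Int) →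
    Bool × PySem.Dict (Int × Int) Int × PySem.Dict Int (Int × Int)
  | [], u, a => (false, u, a)
  | p :: ps, u, a =>
    -- `pairs_usage[pair]` on a defaultdict inserts 0 for a missing key
    let u0 := if u.contains p then u else u.insert p 0
    if u0.getD p 0 < capacity then
      let u1 := u0.insert p (u0.getD p 0 + 1)
      let a1 := a.insert x p
      match pvBtA capacity bd ys u1 a1 with
      | (true, u2, a2) => (true, u2, a2)
      | (false, u2, a2) =>
          pvTryA capacity bd x ys ps (u2.insert p (u2.getD p 0 - 1)) (a2.erase x)
    else pvTryA capacity bd x ys ps u0 a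
  termination_by l _ _ => (ys.length + 1, 0, l.length)
end

def check_witness_2to1 (blocked : List (Int × List (Int × Int))) (capacity : Int) :
    Bool × (Option (List (Int × Int × Int))) :=
  match blocked with
  | [] => (true, some [])      -- `if not blocked: return True, {}`
  | _ :: _ =>
    let bd := PySem.Dict.ofList blocked
    let elements := PySem.List.sorted bd.keys (fun x => (bd.getD x []).length) false
    match pvBtA capacity bd elements PySem.Dict.empty PySem.Dict.empty with
    | (true, _, a) => (true, some a.items)
    | (false, _, _) => (false, none)

-- ===== PORT B =====

-- a DFS choice point of Source B: (element, untried candidates, remaining elements,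
-- usage counts, partial assignment)
def pvSt : Type :=
  Int × List (Int × Int) × List Int × PySem.Dict (Int × Int) Int × PySem.Dict Int (Int × Int)

def pvRank (bd : PySem.Dict Int (List (Int × Int))) (s : pvSt) : Nat :=
  s.2.1.length + (s.2.2.1.map (fun y => (bd.getD y []).length)).sum

def pvMeasure (bd : PySem.Dict Int (List (Int × Int))) (l : List pvSt) : Nat :=
  (l.map (fun s => 3 ^ pvRank bd s)).sum

-- length fact the termination argument of pvRunB needs
theorem pvSortedPairs_length (l : List (Int × Int)) : (pvSortedPairs l).length = l.length :=
  (PySem.List.sorted2_perm _ _ _ _).length_eq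

-- arithmetic shapes of pvRunB's termination goals
theorem pvPow3 (c T S : Nat) : 3 ^ T + (3 ^ (c + T) + S) < 3 ^ (c + 1 + T) + S := by
  have h1 : 3 ^ T ≤ 3 ^ (c + T) := Nat.pow_le_pow_right (by norm_num) (by omega)
  have h2 : (3:Nat) ^ (c + 1 + T) = 3 * 3 ^ (c + T) := by
    rw [Nat.add_right_comm, Nat.pow_succ, Nat.mul_comm]
  have h3 : 0 < 3 ^ (c + T) := Nat.pow_pos (by norm_num)
  omega

theorem pvPow3b (c T S : Nat) : 3 ^ (c + T) + S < 3 ^ (c + 1 + T) + S := by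
  have h2 : (3:Nat) ^ (c + 1 + T) = 3 * 3 ^ (c + T) := by
    rw [Nat.add_right_comm, Nat.pow_succ, Nat.mul_comm]
  have h3 : 0 < 3 ^ (c + T) := Nat.pow_pos (by norm_num)
  omega

-- Source B's `while stack:` loop; each unfolding is one iteration (pop, push the
-- alternative, and — if the candidate fits — succeed or push the child state).
def pvRunB (capacity : Int) (bd : PySem.Dict Int (List (Int × Int))) :
    List pvSt → Bool × (Option (List (Int × Int × Int)))
  | [] => (false, none)
  | ((_, [], _, _, _) : pvSt) :: rest => pvRunB capacity bd rest
  | ((x, p :: cs, [], u, a) : pvSt) :: rest =>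
    if u.getD p 0 < capacity then (true, some ((a.insert x p).items))
    else pvRunB capacity bd ((x, cs, [], u, a) :: rest)
  | ((x, p :: cs, y :: ts, u, a) : pvSt) :: rest =>
    if u.getD p 0 < capacity then
      pvRunB capacity bd
        ((y, pvSortedPairs (bd.getD y []), ts,
          u.insert p (u.getD p 0 + 1), a.insert x p) :: (x, cs, y :: ts, u, a) :: rest)
    else pvRunB capacity bd ((x, cs, y :: ts, u, a) :: rest)
  termination_by l => pvMeasure bd l
  decreasing_by
  all_goals simp only [pvMeasure, pvRank, List.map_cons, List.sum_cons, List.length_cons,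
    pvSortedPairs_length]
  all_goals first
    | exact Nat.lt_add_of_pos_left (Nat.pow_pos (by norm_num))
    | exact pvPow3 _ _ _
    | exact pvPow3b _ _ _

def check_witness_2to1_alt (blocked : List (Int × List (Int × Int))) (capacity : Int) :
    Bool × (Option (List (Int × Int × Int))) :=
  match blocked with
  | [] => (true, some [])      -- `if not blocked: return True, {}`
  | _ :: _ =>
    let bd := PySem.Dict.ofList blocked
    let elements := PySem.List.sorted bd.keys (fun x => (bd.getD x []).length) false
    match elements with
    | [] => (false, none)      -- unreachable: a nonempty dict has a key
    | e :: rest =>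
        pvRunB capacity bd
          [(e, pvSortedPairs (bd.getD e []), rest, PySem.Dict.empty, PySem.Dict.empty)]

-- ===== PRECONDITION & SPEC =====
def Spec_check_witness_2to1 (blocked : List (Int × List (Int × Int))) (capacity : Int) (out : Bool × (Option (List (Int × Int × Int)))) : Prop := out = check_witness_2to1_alt blocked capacity
instance (blocked : List (Int × List (Int × Int))) (capacity : Int) (out : Bool × (Option (List (Int × Int × Int)))) : Decidable (Spec_check_witness_2to1 blocked capacity out) := by unfold Spec_check_witness_2to1; infer_instance

-- ===== CLAIM (what is proved, stated in full; the proofs are below) =====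
def Claim_equal_check_witness_2to1 : Prop := ∀ (blocked : List (Int × List (Int × Int))) (capacity : Int), Dom_check_witness_2to1 blocked capacity → Spec_check_witness_2to1 blocked capacity (check_witness_2to1 blocked capacity)

-- ===== LEMMAS AND PROOFS =====

-- a defaultdict "touch" (read of a missing key inserting 0) changes no looked-up count
theorem pvTouch_getD (u : PySem.Dict (Int × Int) Int) (p q : Int × Int) :
    (if u.contains p then u else u.insert p 0).getD q 0 = u.getD q 0 := by
  by_cases h : u.contains p = true
  · rw [if_pos h]
  · rw [if_neg h, PySem.Dict.getD_insert]
    split_ifs with hq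
    · subst hq
      exact (PySem.Dict.getD_of_not_contains _ _ (by simpa using h)).symm
    · rfl

-- deleting a freshly inserted key restores the dict
theorem pvEraseInsert (a : PySem.Dict Int (Int × Int)) (x : Int) (p : Int × Int)
    (h : a.contains x = false) : (a.insert x p).erase x = a := by
  apply PySem.Dict.ext
  show ((a.insert x p).items.filter (fun q => !(q.1 == x))) = a.items
  rw [PySem.Dict.items_insert_of_not_contains _ _ h, List.filter_append]
  have h2 : ∀ q ∈ a.items, (!(q.1 == x)) = true := by
    intro q hq
    simp only [PySem.Dict.contains, List.any_eq_false] at h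
    simpa using h q hq
  rw [List.filter_eq_self.mpr h2]
  simp

-- Main correspondence: B's DFS on a stack headed by the choice point
-- (x, cands, todo, uB, aB) computes what A's `backtrack` loop `pvTryA` computes;
-- on failure A's loop hands back the assignment unchanged and usage counts
-- unchanged up to defaultdict zero-touches, and B falls through to the rest of
-- the stack.
theorem pvMain (capacity : Int) (bd : PySem.Dict Int (List (Int × Int))) :
    ∀ (n : Nat) (todo : List Int), todo.length < n →
    ∀ (cands : List (Int × Int)) (x : Int)
      (uA uB : PySem.Dict (Int × Int) Int) (aA aB : PySem.Dict Int (Int × Int))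
      (stack : List pvSt),
      (∀ q, uA.getD q 0 = uB.getD q 0) → aA = aB →
      (x :: todo).Nodup → (∀ z ∈ x :: todo, aA.contains z = false) →
      (((pvTryA capacity bd x todo cands uA aA).1 = true →
          pvRunB capacity bd (((x, cands, todo, uB, aB) : pvSt) :: stack)
            = (true, some (pvTryA capacity bd x todo cands uA aA).2.2.items))
      ∧ ((pvTryA capacity bd x todo cands uA aA).1 = false →
          pvRunB capacity bd (((x, cands, todo, uB, aB) : pvSt) :: stack) = pvRunB capacity bd stack
          ∧ (pvTryA capacity bd x todo cands uA aA).2.2 = aA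
          ∧ ∀ q, (pvTryA capacity bd x todo cands uA aA).2.1.getD q 0 = uA.getD q 0)) := by
  intro n
  induction n with
  | zero => intro todo h; omega
  | succ n ih =>
    intro todo hlen cands
    induction cands with
    | nil =>
      intro x uA uB aA aB stack husim haeq hnd hfresh
      have hA : pvTryA capacity bd x todo [] uA aA = (false, uA, aA) := by rw [pvTryA]
      constructor
      · intro h; rw [hA] at h; simp at h
      · intro _
        rw [hA]
        exact ⟨by rw [pvRunB], rfl, fun q => rfl⟩
    | cons p cs ihc =>
      intro x uA uB aA aB stack husim haeq hnd hfresh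
      have hu0 : ∀ q, (if uA.contains p then uA else uA.insert p 0).getD q 0 = uA.getD q 0 :=
        pvTouch_getD uA p
      set u0 := if uA.contains p then uA else uA.insert p 0 with hu0def
      cases todo with
      | nil =>
        by_cases hcap : u0.getD p 0 < capacity
        · have hcapB : uB.getD p 0 < capacity := by rw [← husim p, ← hu0 p]; exact hcap
          have hA : pvTryA capacity bd x [] (p :: cs) uA aA
              = (true, u0.insert p (u0.getD p 0 + 1), aA.insert x p) := by
            rw [pvTryA]
            simp only [← hu0def, if_pos hcap, pvBtA]
          constructor
          · intro _
            rw [hA, pvRunB]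
            simp only [if_pos hcapB, haeq]
          · intro h; rw [hA] at h; simp at h
        · have hcapB : ¬ uB.getD p 0 < capacity := by rw [← husim p, ← hu0 p]; exact hcap
          have hA : pvTryA capacity bd x [] (p :: cs) uA aA
              = pvTryA capacity bd x [] cs u0 aA := by
            rw [pvTryA]
            simp only [← hu0def, if_neg hcap]
          have hstep : pvRunB capacity bd (((x, p :: cs, [], uB, aB) : pvSt) :: stack)
              = pvRunB capacity bd (((x, cs, [], uB, aB) : pvSt) :: stack) := by
            rw [pvRunB, if_neg hcapB]
          have IHC := ihc x u0 uB aA aB stack (fun q => by rw [hu0 q, husim q]) haeq hnd hfresh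
          rw [hA, hstep]
          refine ⟨IHC.1, fun h => ?_⟩
          obtain ⟨r1, r2, r3⟩ := IHC.2 h
          exact ⟨r1, r2, fun q => by rw [r3 q, hu0 q]⟩
      | cons y ts =>
        by_cases hcap : u0.getD p 0 < capacity
        · have hcapB : uB.getD p 0 < capacity := by rw [← husim p, ← hu0 p]; exact hcap
          have hbt : pvBtA capacity bd (y :: ts) (u0.insert p (u0.getD p 0 + 1)) (aA.insert x p)
              = pvTryA capacity bd y ts (pvSortedPairs (bd.getD y []))
                  (u0.insert p (u0.getD p 0 + 1)) (aA.insert x p) := by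
            rw [pvBtA]
          have husim1 : ∀ q, (u0.insert p (u0.getD p 0 + 1)).getD q 0
              = (uB.insert p (uB.getD p 0 + 1)).getD q 0 := by
            intro q
            rw [PySem.Dict.getD_insert, PySem.Dict.getD_insert]
            split_ifs with hq
            · rw [hu0 p, husim p]
            · rw [hu0 q, husim q]
          have hnd' : (y :: ts).Nodup := hnd.of_cons
          have hfresh' : ∀ z ∈ y :: ts, (aA.insert x p).contains z = false := by
            intro z hz
            rw [PySem.Dict.contains_insert]
            have hzx : z ≠ x := by
              rintro rfl
              exact (List.nodup_cons.mp hnd).1 hz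
            rw [hfresh z (List.mem_cons_of_mem _ hz)]
            simp [hzx]
          have hts : ts.length < n := by simpa using hlen
          have IH := ih ts hts (pvSortedPairs (bd.getD y [])) y
            (u0.insert p (u0.getD p 0 + 1)) (uB.insert p (uB.getD p 0 + 1))
            (aA.insert x p) (aB.insert x p)
            (((x, cs, (y :: ts), uB, aB) : pvSt) :: stack)
            husim1 (by rw [haeq]) hnd' hfresh'
          -- one unfolding of B's loop: pop, then push alternative and child
          have hstep : pvRunB capacity bd (((x, p :: cs, y :: ts, uB, aB) : pvSt) :: stack)
              = pvRunB capacity bd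
                  (((y, pvSortedPairs (bd.getD y []), ts,
                     uB.insert p (uB.getD p 0 + 1), aB.insert x p) : pvSt)
                   :: ((x, cs, y :: ts, uB, aB) : pvSt) :: stack) := by
            rw [pvRunB, if_pos hcapB]
          set res := pvTryA capacity bd y ts (pvSortedPairs (bd.getD y []))
            (u0.insert p (u0.getD p 0 + 1)) (aA.insert x p) with hres
          have hA : pvTryA capacity bd x (y :: ts) (p :: cs) uA aA
              = if res.1 = true then res
                else pvTryA capacity bd x (y :: ts) cs
                  (res.2.1.insert p (res.2.1.getD p 0 - 1)) (res.2.2.erase x) := by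
            rw [pvTryA]
            simp only [← hu0def, if_pos hcap, hbt, ← hres]
            rcases res with ⟨b, u2, a2⟩
            cases b <;> simp
          rcases hb : res.1 with _ | _
          · -- subtree failed: A undoes its updates, B falls back to the alternative
            obtain ⟨hrun1, hasn1, husage1⟩ := IH.2 hb
            have ha3 : res.2.2.erase x = aA := by
              rw [hasn1, pvEraseInsert aA x p (hfresh x List.mem_cons_self)]
            have hu3 : ∀ q, (res.2.1.insert p (res.2.1.getD p 0 - 1)).getD q 0 = uA.getD q 0 := by
              intro q
              have h1 := husage1 q
              have h2 := husage1 p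
              rw [PySem.Dict.getD_insert] at h1 h2
              simp only [if_true] at h2
              rw [PySem.Dict.getD_insert, h2]
              split_ifs with hq
              · rw [hq, hu0 p]; omega
              · rw [if_neg hq] at h1
                rw [h1, hu0 q]
            have IHC := ihc x (res.2.1.insert p (res.2.1.getD p 0 - 1)) uB
              (res.2.2.erase x) aB stack
              (fun q => by rw [hu3 q, husim q]) (by rw [ha3, haeq]) hnd
              (by intro z hz; rw [ha3]; exact hfresh z hz)
            rw [hA]
            simp only [hb, Bool.false_eq_true, if_false]
            constructor
            · intro h
              rw [hstep, hrun1]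
              exact IHC.1 h
            · intro h
              obtain ⟨r1, r2, r3⟩ := IHC.2 h
              refine ⟨by rw [hstep, hrun1, r1], by rw [r2, ha3], fun q => by rw [r3 q, hu3 q]⟩
          · -- subtree succeeded
            have hAres : pvTryA capacity bd x (y :: ts) (p :: cs) uA aA = res := by
              rw [hA, hb]; simp
            constructor
            · intro _
              rw [hAres, hstep]
              exact IH.1 hb
            · intro h; rw [hAres] at h; rw [h] at hb; simp at hb
        · have hcapB : ¬ uB.getD p 0 < capacity := by rw [← husim p, ← hu0 p]; exact hcap
          have hA : pvTryA capacity bd x (y :: ts) (p :: cs) uA aA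
              = pvTryA capacity bd x (y :: ts) cs u0 aA := by
            rw [pvTryA]
            simp only [← hu0def, if_neg hcap]
          have hstep : pvRunB capacity bd (((x, p :: cs, y :: ts, uB, aB) : pvSt) :: stack)
              = pvRunB capacity bd (((x, cs, y :: ts, uB, aB) : pvSt) :: stack) := by
            rw [pvRunB, if_neg hcapB]
          have IHC := ihc x u0 uB aA aB stack (fun q => by rw [hu0 q, husim q]) haeq hnd hfresh
          rw [hA, hstep]
          refine ⟨IHC.1, fun h => ?_⟩
          obtain ⟨r1, r2, r3⟩ := IHC.2 h
          exact ⟨r1, r2, fun q => by rw [r3 q, hu0 q]⟩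

-- ===== VERDICT (by name: the statement is the Claim_ definition above) =====
theorem check_witness_2to1_spec : Claim_equal_check_witness_2to1 := by
  intro blocked capacity _
  show check_witness_2to1 blocked capacity = check_witness_2to1_alt blocked capacity
  cases blocked with
  | nil => rfl
  | cons b bl =>
    rw [check_witness_2to1, check_witness_2to1_alt]
    set bd := PySem.Dict.ofList (b :: bl) with hbd
    set elements := PySem.List.sorted bd.keys (fun x => (bd.getD x []).length) false with helem
    have hkeys : b.1 ∈ bd.keys := by
      rw [hbd]
      show b.1 ∈ (PySem.Dict.empty.update (b :: bl)).keys
      rw [PySem.Dict.update,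
        PySem.Dict.keys_foldl_insert_key (b :: bl) (fun t => t.1) (fun _ t => t.2)
          PySem.Dict.empty]
      rw [show (PySem.Dict.empty : PySem.Dict Int (List (Int × Int))).keys = [] from rfl,
        PySem.Set.update_nil_left]
      rw [PySem.Set.mem_ofList]
      exact List.mem_map_of_mem (l := b :: bl) (f := fun t => t.1) List.mem_cons_self
    have hne : elements ≠ [] := by
      rw [helem, Ne, PySem.List.sorted_eq_nil_iff]
      intro h
      rw [h] at hkeys
      exact (List.not_mem_nil) hkeys
    have hnd : elements.Nodup :=
      (PySem.List.sorted_perm bd.keys _ false).nodup_iff.mpr (PySem.Dict.nodup_keys_ofList _)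
    cases helems : elements with
    | nil => exact absurd helems hne
    | cons e rest =>
      have hbt : pvBtA capacity bd (e :: rest) PySem.Dict.empty PySem.Dict.empty
          = pvTryA capacity bd e rest (pvSortedPairs (bd.getD e [])) PySem.Dict.empty
              PySem.Dict.empty := by rw [pvBtA]
      have hmain := pvMain capacity bd (rest.length + 1) rest (by omega)
        (pvSortedPairs (bd.getD e [])) e
        PySem.Dict.empty PySem.Dict.empty PySem.Dict.empty PySem.Dict.empty []
        (fun q => rfl) rfl (helems ▸ hnd)
        (fun z _ => PySem.Dict.contains_empty z)
      rw [hbt]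
      rcases hb : (pvTryA capacity bd e rest (pvSortedPairs (bd.getD e [])) PySem.Dict.empty
          PySem.Dict.empty) with ⟨bres, u2, a2⟩
      cases bres with
      | true =>
        have h1 := hmain.1 (by rw [hb])
        rw [hb] at h1
        exact h1.symm
      | false =>
        have h2 := (hmain.2 (by rw [hb])).1
        have h3 : pvRunB capacity bd ([] : List pvSt) = (false, none) := by rw [pvRunB]
        exact ((h2.trans h3).symm : _)
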